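-- pv_equiv track=rewrite | github.com/amardipkumar91/PracticePython2 | LeedCode/stack_problem.py | remove_star
-- ===== SOURCE A (Python) =====
-- def remove_star(strn):
--     stack = []
--     for i in strn:
--         if i == '*':
--             if stack:
--                 stack.pop()
--         else:
--             stack.append(i)
--     return "".join(stack)
-- ===== SOURCE B (Python) =====
-- def remove_star(strn):
--     skip = 0
--     kept = []
--     for ch in reversed(strn):
--         if ch == '*':
--             skip += 1
--         elif skip > 0:
--             skip -= 1
--         else:
--             kept.append(ch)
--     return "".join(reversed(kept))
-- ===== Notes on version B (the rewrite author's own statement) =====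
-- stated objective: alternative
-- what changed: Replaced the character stack (append/pop) with a single right-to-left pass that keeps only an integer counter of pending stars, reversing the kept characters at the end.
import Mathlib
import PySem

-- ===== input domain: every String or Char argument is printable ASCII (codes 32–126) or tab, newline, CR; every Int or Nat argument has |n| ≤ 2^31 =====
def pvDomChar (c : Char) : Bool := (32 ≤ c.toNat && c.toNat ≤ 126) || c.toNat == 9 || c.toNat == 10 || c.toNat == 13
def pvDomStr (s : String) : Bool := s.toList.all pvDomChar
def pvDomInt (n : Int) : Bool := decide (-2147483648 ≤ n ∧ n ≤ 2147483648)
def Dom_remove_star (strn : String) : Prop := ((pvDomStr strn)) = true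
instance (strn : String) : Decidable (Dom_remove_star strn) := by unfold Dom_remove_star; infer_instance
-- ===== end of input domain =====

-- B replaces A's character stack with a right-to-left pass keeping only a counter of
-- pending stars (alternative decomposition, same cost); equivalence proved for all strings.

-- ===== PORT A =====
def remove_star (strn : String) : String :=
  let stack := strn.toList.foldl
    (fun stack i =>
      if i = '*' then (if stack.isEmpty then stack else stack.dropLast)
      else stack ++ [i]) []
  String.mk stack

-- ===== PORT B =====
def remove_star_alt (strn : String) : String :=
  let p := strn.toList.reverse.foldl
    (fun (st : Nat × List Char) ch =>
      if ch = '*' then (st.1 + 1, st.2)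
      else if st.1 > 0 then (st.1 - 1, st.2)
      else (st.1, st.2 ++ [ch])) (0, [])
  String.mk p.2.reverse

-- ===== PRECONDITION & SPEC =====
def Spec_remove_star (strn : String) (out : String) : Prop := out = remove_star_alt strn
instance (strn : String) (out : String) : Decidable (Spec_remove_star strn out) := by unfold Spec_remove_star; infer_instance

-- ===== CLAIM (what is proved, stated in full; the proofs are below) =====
def Claim_equal_remove_star : Prop := ∀ (strn : String), Dom_remove_star strn → Spec_remove_star strn (remove_star strn)

-- ===== LEMMAS AND PROOFS =====

-- Right-to-left specification: gAux k l processes l from its right end, starting with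
-- k pending stars at the right; returns (surplus pending stars, kept chars in order).
def gAux (k : Nat) : List Char → Nat × List Char
  | [] => (k, [])
  | c :: t =>
    let p := gAux k t
    if c = '*' then (p.1 + 1, p.2)
    else if p.1 > 0 then (p.1 - 1, p.2)
    else (p.1, c :: p.2)

theorem take_dropLast_eq (s : List Char) (k : Nat) :
    s.dropLast.take (s.dropLast.length - k) = s.take (s.length - (k + 1)) := by
  rw [List.dropLast_eq_take, List.take_take, List.length_take]
  congr 1
  omega

-- A's stack fold from an arbitrary stack s: the surplus stars of l pop off s's end,
-- then the kept chars of l follow.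
theorem foldA_eq (l : List Char) (s : List Char) :
    l.foldl
      (fun stack i =>
        if i = '*' then (if stack.isEmpty then stack else stack.dropLast)
        else stack ++ [i]) s
    = s.take (s.length - (gAux 0 l).1) ++ (gAux 0 l).2 := by
  induction l generalizing s with
  | nil => simp [gAux]
  | cons c t ih =>
    simp only [List.foldl_cons, gAux]
    by_cases hc : c = '*'
    · subst hc
      simp only [reduceIte]
      rcases s with _ | ⟨a, s'⟩
      · simpa using ih []
      · simp only [List.isEmpty_cons, Bool.false_eq_true, if_false, ih, take_dropLast_eq]
    · simp only [hc, reduceIte, ih]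
      by_cases hk : (gAux 0 t).1 > 0
      · simp only [hk]
        have h1 : (s ++ [c]).take ((s ++ [c]).length - (gAux 0 t).1)
            = s.take (s.length - ((gAux 0 t).1 - 1)) := by
          have hle : (s ++ [c]).length - (gAux 0 t).1 ≤ s.length := by simp; omega
          rw [List.take_append_of_le_length hle]
          congr 1
          simp
          omega
        rw [h1]
        simp
      · have hk0 : (gAux 0 t).1 = 0 := by omega
        simp only [hk0, Nat.sub_zero]
        rw [List.take_of_length_le (by simp)]
        simp

-- B's fold over the reversed list computes gAux, appending the kept chars reversed.
theorem foldB_eq (l : List Char) (k : Nat) (acc : List Char) :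
    l.reverse.foldl
      (fun (st : Nat × List Char) ch =>
        if ch = '*' then (st.1 + 1, st.2)
        else if st.1 > 0 then (st.1 - 1, st.2)
        else (st.1, st.2 ++ [ch])) (k, acc)
    = ((gAux k l).1, acc ++ (gAux k l).2.reverse) := by
  induction l generalizing acc with
  | nil => simp [gAux]
  | cons c t ih =>
    simp only [List.reverse_cons, List.foldl_append, List.foldl_cons, List.foldl_nil, ih, gAux]
    by_cases hc : c = '*'
    · simp [hc]
    · by_cases hk : (gAux k t).1 > 0
      · simp [hc, hk]
      · simp [hc, hk]

-- ===== VERDICT (by name: the statement is the Claim_ definition above) =====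
theorem remove_star_spec : Claim_equal_remove_star := by
  intro strn _
  unfold Spec_remove_star remove_star remove_star_alt
  rw [foldA_eq, foldB_eq]
  simp
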